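-- pv_equiv track=rewrite | github.com/socathie/CodeFights | Arcade/ListBackwoods/VolleyballPositions.py | volleyballPositions
-- ===== SOURCE A (Python) =====
-- def volleyballPositions(formation, k):
--     for i in range(0,k%6):
--         temp = formation[1][0]
--         formation[1][0] = formation[0][1]
--         formation[0][1] = formation[1][2]
--         formation[1][2] = formation[3][2]
--         formation[3][2] = formation[2][1]
--         formation[2][1] = formation[3][0]
--         formation[3][0] = temp
--
--     return formation
-- ===== SOURCE B (Python) =====
-- def volleyballPositions(formation, k):
--     r = k % 6
--     if r == 0:
--         return formation
--     cells = [(1, 0), (0, 1), (1, 2), (3, 2), (2, 1), (3, 0)]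
--     vals = [formation[x][y] for x, y in cells]
--     for i, (x, y) in enumerate(cells):
--         formation[x][y] = vals[(i + r) % 6]
--     return formation
-- ===== Notes on version B (the rewrite author's own statement) =====
-- stated objective: alternative
-- what changed: B replaces A's repeated 6-assignment rotation loop (run k%6 times) by a single table-driven reassignment: read the six cycle cells once and write each cell the value r=k%6 steps ahead in the cycle.
import Mathlib
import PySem

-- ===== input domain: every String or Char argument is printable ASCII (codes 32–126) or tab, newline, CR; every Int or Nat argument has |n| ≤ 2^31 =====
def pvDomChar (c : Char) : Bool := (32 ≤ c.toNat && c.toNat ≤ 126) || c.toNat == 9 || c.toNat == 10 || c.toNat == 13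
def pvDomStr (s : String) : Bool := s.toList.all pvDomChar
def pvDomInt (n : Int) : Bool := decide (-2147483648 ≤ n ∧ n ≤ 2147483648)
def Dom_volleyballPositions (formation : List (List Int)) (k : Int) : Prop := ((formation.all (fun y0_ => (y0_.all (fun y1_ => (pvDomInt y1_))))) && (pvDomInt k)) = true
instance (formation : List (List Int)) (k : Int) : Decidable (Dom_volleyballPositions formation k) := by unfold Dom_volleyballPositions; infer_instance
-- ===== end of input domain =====

-- B replaces A's repeated 6-assignment rotation loop by one table-driven reassignment
-- (read the six cycle cells once, write each the value k%6 steps ahead): alternative decomposition, same cost class.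
-- NOTE: both Pythons mutate `formation` in place identically; the equivalence proved here is about the return value.

-- ===== PORT A =====
-- formation[i][j] read/write; in-range guaranteed by Pre_ (total forms used under that guard)
def pvGet (f : List (List Int)) (i j : Nat) : Int := (f.getD i []).getD j 0
def pvSet (f : List (List Int)) (i j : Nat) (v : Int) : List (List Int) := f.set i ((f.getD i []).set j v)

def vpStep (f : List (List Int)) : List (List Int) :=
  let temp := pvGet f 1 0
  let f1 := pvSet f 1 0 (pvGet f 0 1)
  let f2 := pvSet f1 0 1 (pvGet f1 1 2)
  let f3 := pvSet f2 1 2 (pvGet f2 3 2)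
  let f4 := pvSet f3 3 2 (pvGet f3 2 1)
  let f5 := pvSet f4 2 1 (pvGet f4 3 0)
  pvSet f5 3 0 temp

def volleyballPositions (formation : List (List Int)) (k : Int) : List (List Int) :=
  (PySem.List.pyRange 0 (PySem.Int.mod k 6) 1).foldl (fun acc _ => vpStep acc) formation

-- ===== PORT B =====
def vpCells : List (Nat × Nat) := [(1,0),(0,1),(1,2),(3,2),(2,1),(3,0)]

def volleyballPositions_alt (formation : List (List Int)) (k : Int) : List (List Int) :=
  let r := PySem.Int.mod k 6
  if r = 0 then formation
  else
    let vals := vpCells.map (fun c => pvGet formation c.1 c.2)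
    (PySem.List.enumerate vpCells).foldl
      (fun acc ic => pvSet acc ic.2.1 ic.2.2 (PySem.List.pyGetD vals (PySem.Int.mod (ic.1 + r) 6) 0))
      formation

-- ===== PRECONDITION & SPEC =====
-- Pre_ excludes exactly the inputs where Python A raises IndexError: k%6 ≠ 0 with a formation
-- lacking one of the six accessed cells (rows 0..3 with row lengths 2,3,2,3).
def Pre_volleyballPositions (formation : List (List Int)) (k : Int) : Prop :=
  PySem.Int.mod k 6 = 0 ∨
    (4 ≤ formation.length ∧ 2 ≤ (formation.getD 0 []).length ∧ 3 ≤ (formation.getD 1 []).length ∧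
     2 ≤ (formation.getD 2 []).length ∧ 3 ≤ (formation.getD 3 []).length)
instance (formation : List (List Int)) (k : Int) : Decidable (Pre_volleyballPositions formation k) := by
  unfold Pre_volleyballPositions; infer_instance

def pvWitness_volleyballPositions : List (List Int) × Int :=
  ([[1, 2, 3], [4, 5, 6], [7, 8, 9], [10, 11, 12]], 2)

def Spec_volleyballPositions (formation : List (List Int)) (k : Int) (out : List (List Int)) : Prop := out = volleyballPositions_alt formation k
instance (formation : List (List Int)) (k : Int) (out : List (List Int)) : Decidable (Spec_volleyballPositions formation k out) := by unfold Spec_volleyballPositions; infer_instance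

-- ===== CLAIM (what is proved, stated in full; the proofs are below) =====
def Claim_equal_volleyballPositions : Prop := ∀ (formation : List (List Int)) (k : Int), Dom_volleyballPositions formation k → Pre_volleyballPositions formation k → Spec_volleyballPositions formation k (volleyballPositions formation k)

-- ===== LEMMAS AND PROOFS =====

-- one rotation step on a formation with the six cells exposed
lemma vpStep_cons (a b : Int) (t0 : List Int) (c d e : Int) (t1 : List Int)
    (p q : Int) (t2 : List Int) (u v w : Int) (t3 : List Int) (rest : List (List Int)) :
    vpStep ((a::b::t0)::(c::d::e::t1)::(p::q::t2)::(u::v::w::t3)::rest)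
      = ((a::e::t0)::(b::d::w::t1)::(p::u::t2)::(c::v::q::t3)::rest) := by
  rfl

lemma vp_eq_of_shape (f : List (List Int)) (k : Int)
    (hs : 4 ≤ f.length ∧ 2 ≤ (f.getD 0 []).length ∧ 3 ≤ (f.getD 1 []).length ∧
      2 ≤ (f.getD 2 []).length ∧ 3 ≤ (f.getD 3 []).length) :
    volleyballPositions f k = volleyballPositions_alt f k := by
  obtain ⟨h0, h1, h2, h3, h4⟩ := hs
  rcases f with _ | ⟨r0, _ | ⟨r1, _ | ⟨r2, _ | ⟨r3, rest⟩⟩⟩⟩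
  · simp at h0
  · simp at h0
  · simp at h0
  · simp at h0
  simp only [List.getD_cons_zero, List.getD_cons_succ] at h1 h2 h3 h4
  rcases r0 with _ | ⟨a, _ | ⟨b, t0⟩⟩
  · simp at h1
  · simp at h1
  rcases r1 with _ | ⟨c, _ | ⟨d, _ | ⟨e, t1⟩⟩⟩
  · simp at h2
  · simp at h2
  · simp at h2
  rcases r2 with _ | ⟨p, _ | ⟨q, t2⟩⟩
  · simp at h3
  · simp at h3
  rcases r3 with _ | ⟨u, _ | ⟨v, _ | ⟨w, t3⟩⟩⟩
  · simp at h4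
  · simp at h4
  · simp at h4
  have hlo : 0 ≤ PySem.Int.mod k 6 := PySem.Int.mod_nonneg k (by norm_num)
  have hhi : PySem.Int.mod k 6 < 6 := PySem.Int.mod_lt k (by norm_num)
  obtain h | h | h | h | h | h :
      PySem.Int.mod k 6 = 0 ∨ PySem.Int.mod k 6 = 1 ∨ PySem.Int.mod k 6 = 2 ∨
      PySem.Int.mod k 6 = 3 ∨ PySem.Int.mod k 6 = 4 ∨ PySem.Int.mod k 6 = 5 := by omega
  · simp only [volleyballPositions, volleyballPositions_alt, h]; rfl
  · simp only [volleyballPositions, volleyballPositions_alt, h]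
    rw [show PySem.List.pyRange 0 (1:Int) 1 = [0] from by decide]
    simp only [List.foldl_cons, List.foldl_nil, vpStep_cons]
    rfl
  · simp only [volleyballPositions, volleyballPositions_alt, h]
    rw [show PySem.List.pyRange 0 (2:Int) 1 = [0, 1] from by decide]
    simp only [List.foldl_cons, List.foldl_nil, vpStep_cons]
    rfl
  · simp only [volleyballPositions, volleyballPositions_alt, h]
    rw [show PySem.List.pyRange 0 (3:Int) 1 = [0, 1, 2] from by decide]
    simp only [List.foldl_cons, List.foldl_nil, vpStep_cons]
    rfl
  · simp only [volleyballPositions, volleyballPositions_alt, h]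
    rw [show PySem.List.pyRange 0 (4:Int) 1 = [0, 1, 2, 3] from by decide]
    simp only [List.foldl_cons, List.foldl_nil, vpStep_cons]
    rfl
  · simp only [volleyballPositions, volleyballPositions_alt, h]
    rw [show PySem.List.pyRange 0 (5:Int) 1 = [0, 1, 2, 3, 4] from by decide]
    simp only [List.foldl_cons, List.foldl_nil, vpStep_cons]
    rfl

-- ===== VERDICT (by name: the statement is the Claim_ definition above) =====
theorem volleyballPositions_spec : Claim_equal_volleyballPositions := by
  intro f k _ hpre
  unfold Spec_volleyballPositions
  rcases hpre with h | hs
  · simp only [volleyballPositions, volleyballPositions_alt, h]; rfl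
  · exact vp_eq_of_shape f k hs
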